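-- pv_equiv track=rewrite | github.com/khloe1425/luyenthihsgioi | THCS/2022_2023/DakNong_2223/Bai4/FLASHBACK.py | count_virus
-- ===== SOURCE A (Python) =====
-- def count_virus(n, k):
--     MOD = 10**9 + 7
--     # Danh sách để lưu số lượng cá thể mỗi ngày
--     virus = [0] * (k + 1)
--     virus[0] = n  # Ngày 0 có n cá thể ở mức 1
--
--     # Lặp qua từng ngày
--     for day in range(1, k + 1):
--         new_viruses = 0
--         # Tính số cá thể mới sinh ra trong ngày
--         for level in range(day):
--             new_viruses += virus[level] * (level + 1)
--             new_viruses %= MOD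
--
--         # Cập nhật số lượng cá thể cho ngày tiếp theo
--         for level in range(day, 0, -1):
--             virus[level] = virus[level - 1]
--         virus[0] = new_viruses  # Cập nhật số lượng cá thể ở mức 1
--
--     # Tính tổng số cá thể
--     total_virus = sum(virus) % MOD
--
--     return total_virus
-- ===== SOURCE B (Python) =====
-- def count_virus(n, k):
--     MOD = 10**9 + 7
--     total = n            # sum of all a_d (a_0 = n)
--     S = n % MOD          # sum of a_j mod MOD
--     T = 0                # sum of j*a_j mod MOD
--     for d in range(1, k + 1):
--         a = (d * S - T) % MOD
--         total += a
--         S = (S + a) % MOD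
--         T = (T + d * a) % MOD
--     return total % MOD
-- ===== Notes on version B (the rewrite author's own statement) =====
-- stated objective: faster
-- what changed: Replaces A's per-day O(day) convolution sum and in-place list shifting with the closed-form recurrence a_d = (d*S - T) mod M maintained via running sums S = sum(a_j) and T = sum(j*a_j) in a single O(k) pass with O(1) state.
import Mathlib
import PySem

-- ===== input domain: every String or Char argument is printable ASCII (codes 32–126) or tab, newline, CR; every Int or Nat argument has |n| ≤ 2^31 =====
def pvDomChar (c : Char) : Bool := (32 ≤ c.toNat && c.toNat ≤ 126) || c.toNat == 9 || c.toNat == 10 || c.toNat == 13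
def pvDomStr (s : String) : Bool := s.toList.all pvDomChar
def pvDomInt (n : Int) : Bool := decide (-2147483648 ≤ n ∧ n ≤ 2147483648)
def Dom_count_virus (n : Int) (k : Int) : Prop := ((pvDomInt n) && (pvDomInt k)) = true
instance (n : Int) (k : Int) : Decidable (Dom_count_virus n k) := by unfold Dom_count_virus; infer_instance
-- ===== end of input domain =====

-- B replaces A's O(k^2) per-day convolution and list shifting with the O(k) recurrence
-- a_d = (d*S - T) mod M maintained by running sums S = Σ a_j, T = Σ j*a_j (return value only).

-- ===== PORT A =====
-- one day of A's outer loop: the inner convolution sum, the downward shift, and virus[0] = new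
def count_virus_day (MOD : Int) (virus : List Int) (day : Int) : List Int :=
  let new_viruses : Int :=
    (PySem.List.pyRange 0 day 1).foldl
      (fun acc level => PySem.Int.mod (acc + PySem.List.pyGetD virus level 0 * (level + 1)) MOD) 0
  let virus2 :=
    (PySem.List.pyRange day 0 (-1)).foldl
      (fun v level => v.set level.toNat (PySem.List.pyGetD v (level - 1) 0)) virus
  virus2.set 0 new_viruses

def count_virus (n : Int) (k : Int) : Int :=
  let MOD : Int := 10 ^ 9 + 7
  -- virus = [0]*(k+1); virus[0] = n  (IndexError when k < 0: excluded by Pre_)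
  let virus : List Int := (List.replicate (k + 1).toNat (0 : Int)).set 0 n
  let virus := (PySem.List.pyRange 1 (k + 1) 1).foldl (count_virus_day MOD) virus
  PySem.Int.mod virus.sum MOD

-- ===== PORT B =====
-- one day of B's loop over state (total, S, T)
def count_virus_alt_step (MOD : Int) (st : Int × Int × Int) (d : Int) : Int × Int × Int :=
  let a := PySem.Int.mod (d * st.2.1 - st.2.2) MOD
  (st.1 + a, PySem.Int.mod (st.2.1 + a) MOD, PySem.Int.mod (st.2.2 + d * a) MOD)

def count_virus_alt (n : Int) (k : Int) : Int :=
  let MOD : Int := 10 ^ 9 + 7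
  let st := (PySem.List.pyRange 1 (k + 1) 1).foldl (count_virus_alt_step MOD)
    (n, PySem.Int.mod n MOD, 0)
  PySem.Int.mod st.1 MOD

-- ===== PRECONDITION & SPEC =====
-- A raises IndexError on k < 0 (virus = [0]*(k+1) is empty, virus[0] = n fails)
def Pre_count_virus (n : Int) (k : Int) : Prop := 0 ≤ k
instance (n : Int) (k : Int) : Decidable (Pre_count_virus n k) := by unfold Pre_count_virus; infer_instance
def pvWitness_count_virus : Int × Int := (5, 3)

def Spec_count_virus (n : Int) (k : Int) (out : Int) : Prop := out = count_virus_alt n k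
instance (n : Int) (k : Int) (out : Int) : Decidable (Spec_count_virus n k out) := by unfold Spec_count_virus; infer_instance

-- ===== CLAIM (what is proved, stated in full; the proofs are below) =====
def Claim_equal_count_virus : Prop := ∀ (n : Int) (k : Int), Dom_count_virus n k → Pre_count_virus n k → Spec_count_virus n k (count_virus n k)

-- ===== LEMMAS AND PROOFS =====

def pvM : Int := 10 ^ 9 + 7

-- weighted sum Σ_j L[j]*(j+1) over the (reversed) population list, structurally
def pvW : List Int → Int
  | [] => 0
  | x :: L => x + L.sum + pvW L

-- Σ_j j*L[j]
def pvV : List Int → Int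
  | [] => 0
  | _ :: L => pvW L

-- the common value sequence: pvL n d = [a_d, ..., a_1, a_0 = n]
def pvL (n : Int) : Nat → List Int
  | 0 => [n]
  | d + 1 => (pvW (pvL n d) % pvM) :: pvL n d

lemma pvM_pos : (0 : Int) < pvM := by norm_num [pvM]

lemma length_pvL (n : Int) : ∀ d, (pvL n d).length = d + 1 := by
  intro d; induction d with
  | zero => rfl
  | succ d ih => simp [pvL, ih]

-- a fold that reduces mod pvM at every step computes the sum mod pvM
lemma pv_modsum {α : Type} (g : α → Int) :
    ∀ (l : List α) (init : Int),
      l.foldl (fun acc t => (acc + g t) % pvM) (init % pvM) = (init + (l.map g).sum) % pvM := by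
  intro l; induction l with
  | nil => intro init; simp
  | cons x l ih =>
    intro init
    have h1 : (init % pvM + g x) % pvM = (init + g x) % pvM := by
      conv_lhs => rw [Int.add_emod, Int.emod_emod_of_dvd _ dvd_rfl, ← Int.add_emod]
    simp only [List.foldl_cons, List.map_cons, List.sum_cons]
    rw [h1, ih (init + g x)]
    ring_nf

lemma pv_getD_append_replicate : ∀ (L : List Int) (z j : Nat),
    (L ++ List.replicate z (0 : Int)).getD j 0 = L.getD j 0 := by
  intro L; induction L with
  | nil => intro z j; simp [List.getD]
  | cons x L ih =>
    intro z j
    cases j with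
    | zero => rfl
    | succ j => simpa using ih z j

lemma pv_sum_getD : ∀ (L : List Int),
    ((List.range L.length).map (fun j => L.getD j 0)).sum = L.sum := by
  intro L; induction L with
  | nil => simp
  | cons x L ih =>
    simp only [List.length_cons, List.range_succ_eq_map, List.map_cons, List.map_map,
      List.sum_cons]
    have h : (List.range L.length).map ((fun j => (x :: L).getD j 0) ∘ Nat.succ)
        = (List.range L.length).map (fun j => L.getD j 0) := by
      apply List.map_congr_left; intro j _; simp [List.getD]
    rw [h, ih]
    simp [List.getD]

lemma pv_W_sum : ∀ (L : List Int),
    ((List.range L.length).map (fun j => L.getD j 0 * ((j : Int) + 1))).sum = pvW L := by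
  intro L; induction L with
  | nil => simp [pvW]
  | cons x L ih =>
    simp only [List.length_cons, List.range_succ_eq_map, List.map_cons, List.map_map,
      List.sum_cons]
    have h : (List.range L.length).map
          ((fun j => (x :: L).getD j 0 * ((j : Int) + 1)) ∘ Nat.succ)
        = (List.range L.length).map (fun j => L.getD j 0 * ((j : Int) + 1) + L.getD j 0) := by
      apply List.map_congr_left; intro j _; simp [List.getD]; ring
    rw [h, PySem.List.sum_map_add_int, ih, pv_sum_getD]
    simp [pvW, List.getD]
    ring

lemma pv_W_eq_sum_V (L : List Int) : pvW L = L.sum + pvV L := by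
  cases L with
  | nil => simp [pvW, pvV]
  | cons x t => simp [pvW, pvV]

-- the downward-shift loop moves v[0..m-1] one slot to the right
lemma pv_shift : ∀ (m : Nat) (v : List Int), m < v.length →
    (PySem.List.pyRange (m : Int) 0 (-1)).foldl
        (fun v level => v.set level.toNat (PySem.List.pyGetD v (level - 1) 0)) v
      = v.take 1 ++ v.take m ++ v.drop (m + 1) := by
  intro m; induction m with
  | zero =>
    intro v hv
    rw [Nat.cast_zero, PySem.List.pyRange_neg_one_eq_nil le_rfl]
    cases v with
    | nil => simp at hv
    | cons a t => simp
  | succ m ih =>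
    intro v hv
    have hc : ((m + 1 : Nat) : Int) = (m : Int) + 1 := by push_cast; ring
    rw [hc, PySem.List.pyRange_neg_one_cons (show (0:Int) < (m:Int) + 1 by positivity)]
    simp only [List.foldl_cons]
    have he : (m : Int) + 1 - 1 = (m : Int) := by ring
    have htn : ((m : Int) + 1).toNat = m + 1 := by omega
    rw [he, htn, PySem.List.pyGetD_natCast]
    set v2 := v.set (m + 1) (v.getD m 0) with hv2
    rw [ih v2 (by simp [hv2]; omega)]
    rw [hv2, List.take_set_of_le (by omega), List.take_set_of_le (by omega)]
    have hdrop : (v.set (m + 1) (v.getD m 0)).drop (m + 1)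
        = v.getD m 0 :: v.drop (m + 2) := by
      rw [List.drop_eq_getElem_cons (by simpa using hv)]
      rw [List.getElem_set_self (by simpa using hv), List.drop_set_of_lt (by omega)]
    rw [hdrop]
    have htake : v.take m ++ [v.getD m 0] = v.take (m + 1) := by
      rw [List.getD_eq_getElem _ _ (by omega)]
      rw [List.take_add_one, List.getElem?_eq_getElem (by omega)]
      simp
    calc v.take 1 ++ v.take m ++ (v.getD m 0 :: v.drop (m + 2))
        = v.take 1 ++ (v.take m ++ [v.getD m 0]) ++ v.drop (m + 2) := by simp
      _ = v.take 1 ++ v.take (m + 1) ++ v.drop (m + 1 + 1) := by rw [htake]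

-- one day of A, applied to the invariant shape, produces the next pvL prefix
lemma pv_day_step (n : Int) (d z : Nat) :
    count_virus_day pvM (pvL n d ++ List.replicate (z + 1) (0 : Int)) ((d : Int) + 1)
      = pvL n (d + 1) ++ List.replicate z (0 : Int) := by
  set L := pvL n d with hL
  have hlen : L.length = d + 1 := length_pvL n d
  have hcast : (d : Int) + 1 = ((d + 1 : Nat) : Int) := by push_cast; ring
  simp only [count_virus_day]
  -- inner convolution sum
  have hinner :
      (PySem.List.pyRange 0 ((d : Int) + 1) 1).foldl
        (fun acc level => PySem.Int.mod
          (acc + PySem.List.pyGetD (L ++ List.replicate (z + 1) (0 : Int)) level 0 * (level + 1)) pvM) 0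
      = pvW L % pvM := by
    rw [hcast, PySem.List.pyRange_zero_nat, List.foldl_map]
    simp only [PySem.Int.mod_eq_emod_of_pos pvM_pos, PySem.List.pyGetD_natCast]
    have hms := pv_modsum
      (fun j : Nat => (L ++ List.replicate (z + 1) (0:Int)).getD j 0 * ((j : Int) + 1))
      (List.range (d + 1)) 0
    rw [Int.zero_emod] at hms
    rw [hms, Int.zero_add]
    have hmapeq : ((List.range (d + 1)).map
          (fun j => (L ++ List.replicate (z + 1) (0:Int)).getD j 0 * ((j : Int) + 1)))
        = ((List.range L.length).map (fun j => L.getD j 0 * ((j : Int) + 1))) := by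
      rw [hlen]; congr 1; funext j; rw [pv_getD_append_replicate]
    rw [hmapeq, pv_W_sum L]
  rw [hinner]
  -- the shift
  have hvlen : (L ++ List.replicate (z + 1) (0:Int)).length = d + 1 + (z + 1) := by
    simp [hlen]
  have hshift := pv_shift (d + 1) (L ++ List.replicate (z + 1) (0:Int)) (by omega)
  rw [hcast, hshift]
  -- compute the three pieces
  obtain ⟨x, L', hxL⟩ : ∃ x L', L = x :: L' := by
    cases hd : d with
    | zero => exact ⟨n, [], by rw [hL, hd]; rfl⟩
    | succ d' => exact ⟨pvW (pvL n d') % pvM, pvL n d', by rw [hL, hd]; rfl⟩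
  have htake1 : (L ++ List.replicate (z + 1) (0:Int)).take 1 = [x] := by
    rw [hxL]; rfl
  have htakeL : (L ++ List.replicate (z + 1) (0:Int)).take (d + 1) = L := by
    rw [← hlen, List.take_left]
  have hdropL : (L ++ List.replicate (z + 1) (0:Int)).drop (d + 1 + 1) = List.replicate z (0:Int) := by
    have : d + 1 + 1 = L.length + 1 := by omega
    rw [this]
    rw [show L.length + 1 = L.length + 1 from rfl, List.drop_append]
    simp [List.replicate_succ]
  rw [htake1, htakeL, hdropL]
  show ([x] ++ L ++ List.replicate z (0:Int)).set 0 (pvW L % pvM) = _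
  simp only [List.cons_append, List.set_cons_zero]
  rw [pvL, ← hL]
  rfl

-- A's outer loop invariant
lemma pv_Ainv (n : Int) (K : Nat) : ∀ d, d ≤ K →
    (PySem.List.pyRange 1 ((d : Int) + 1) 1).foldl (count_virus_day pvM)
        (n :: List.replicate K (0 : Int))
      = pvL n d ++ List.replicate (K - d) (0 : Int) := by
  intro d; induction d with
  | zero =>
    intro _
    rw [show ((0 : Nat) : Int) + 1 = 1 by ring, PySem.List.pyRange_one_eq_nil le_rfl]
    simp [pvL]
  | succ d ih =>
    intro hd
    have hsplit : PySem.List.pyRange 1 (((d + 1 : Nat) : Int) + 1) 1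
        = PySem.List.pyRange 1 ((d : Int) + 1) 1 ++ [(d : Int) + 1] := by
      have : ((d + 1 : Nat) : Int) + 1 = ((d : Int) + 1) + 1 := by push_cast; ring
      rw [this, PySem.List.pyRange_one_succ_right (by omega)]
    rw [hsplit, List.foldl_append, ih (by omega)]
    simp only [List.foldl_cons, List.foldl_nil]
    have hz : K - d = (K - (d + 1)) + 1 := by omega
    rw [hz, pv_day_step n d (K - (d + 1))]

-- B's loop invariant
lemma pv_Binv (n : Int) : ∀ d : Nat,
    (PySem.List.pyRange 1 ((d : Int) + 1) 1).foldl (count_virus_alt_step pvM)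
        (n, n % pvM, 0)
      = ((pvL n d).sum, (pvL n d).sum % pvM,
         ((d : Int) * (pvL n d).sum - pvV (pvL n d)) % pvM) := by
  have hmodL : ∀ x y : Int, (x % pvM + y) % pvM = (x + y) % pvM := by
    intro x y
    conv_lhs => rw [Int.add_emod, Int.emod_emod_of_dvd _ dvd_rfl, ← Int.add_emod]
  have hmodsub : ∀ c x y : Int, (c * (x % pvM) - y % pvM) % pvM = (c * x - y) % pvM := by
    intro c x y
    conv_lhs => rw [Int.sub_emod, Int.mul_emod, Int.emod_emod_of_dvd _ dvd_rfl,
      ← Int.mul_emod, Int.emod_emod_of_dvd _ dvd_rfl, ← Int.sub_emod]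
  intro d; induction d with
  | zero =>
    rw [show ((0 : Nat) : Int) + 1 = 1 by ring, PySem.List.pyRange_one_eq_nil le_rfl]
    simp [pvL, pvV, pvW]
  | succ d ih =>
    have hsplit : PySem.List.pyRange 1 (((d + 1 : Nat) : Int) + 1) 1
        = PySem.List.pyRange 1 ((d : Int) + 1) 1 ++ [(d : Int) + 1] := by
      have : ((d + 1 : Nat) : Int) + 1 = ((d : Int) + 1) + 1 := by push_cast; ring
      rw [this, PySem.List.pyRange_one_succ_right (by omega)]
    rw [hsplit, List.foldl_append, ih]
    simp only [List.foldl_cons, List.foldl_nil, count_virus_alt_step,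
      PySem.Int.mod_eq_emod_of_pos pvM_pos]
    set L := pvL n d with hL
    have ha : (((d : Int) + 1) * (L.sum % pvM) - ((d : Int) * L.sum - pvV L) % pvM) % pvM
        = pvW L % pvM := by
      rw [hmodsub]
      congr 1
      rw [pv_W_eq_sum_V L]; ring
    have hLd1 : pvL n (d + 1) = (pvW L % pvM) :: L := by rw [pvL, ← hL]
    refine Prod.ext ?_ (Prod.ext ?_ ?_)
    · show L.sum + _ = _
      rw [ha, hLd1]
      simp only [List.sum_cons]; ring
    · show (L.sum % pvM + _) % pvM = _
      rw [ha, hmodL, hLd1]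
      simp only [List.sum_cons]
      congr 1; ring
    · show (((d : Int) * L.sum - pvV L) % pvM + ((d : Int) + 1) * _) % pvM = _
      rw [ha, hmodL, hLd1]
      have hV : pvV ((pvW L % pvM) :: L) = pvW L := rfl
      rw [hV]
      simp only [List.sum_cons]
      congr 1
      rw [pv_W_eq_sum_V L]
      push_cast; ring

-- ===== VERDICT (by name: the statement is the Claim_ definition above) =====
theorem count_virus_spec : Claim_equal_count_virus := by
  intro n k _ hpre
  unfold Spec_count_virus
  have hk : k = ((k.toNat : Nat) : Int) := (Int.toNat_of_nonneg hpre).symm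
  set K := k.toNat with hK
  rw [hk]
  simp only [count_virus, count_virus_alt]
  have hMeq : (10 : Int) ^ 9 + 7 = pvM := rfl
  have hinit : (List.replicate (((K : Int) + 1)).toNat (0 : Int)).set 0 n
      = n :: List.replicate K (0 : Int) := by
    have : (((K : Int) + 1)).toNat = K + 1 := by omega
    rw [this, List.replicate_succ, List.set_cons_zero]
  rw [hMeq, hinit]
  simp only [PySem.Int.mod_eq_emod_of_pos pvM_pos]
  rw [pv_Ainv n K K le_rfl, pv_Binv n K]
  rw [Nat.sub_self, List.replicate_zero, List.append_nil]
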